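-- pv_equiv track=rewrite | github.com/hazardscarn/energyagentai | marketing_agent/agent copy 2.py | _parse_email_content
-- ===== SOURCE A (Python) =====
-- from typing import Optional, Dict, Any
--
-- def _parse_email_content(content: str) -> Dict:
--     """Parse email content into structured sections"""
--     sections = {}
--     lines = content.split('\n')
--     current_section = "full_content"
--     current_text = []
--
--     email_indicators = ['subject line:', 'preview text:', 'email content:', 'call to action:']
--
--     for line in lines:
--         line_clean = line.strip()
--         if not line_clean:
--             continue
--
--         line_lower = line_clean.lower()
--         is_section = any(indicator in line_lower for indicator in email_indicators)
--
--         if is_section: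
--             if current_text:
--                 sections[current_section] = '\n'.join(current_text)
--             current_section = line_lower.replace(':', '').strip().replace(' ', '_')
--             current_text = []
--         else:
--             current_text.append(line_clean)
--
--     if current_text:
--         sections[current_section] = '\n'.join(current_text)
--
--     sections["full_content"] = content
--     return sections
-- ===== SOURCE B (Python) =====
-- def _parse_email_content(content: str) -> dict:
--     """Parse email content into structured sections (find-next-header / split decomposition)."""
--     indicators = ('subject line:', 'preview text:', 'email content:', 'call to action:')
--
--     def is_header(ln):
--         low = ln.strip().lower()
--         return any(ind in low for ind in indicators)
--
--     def emit(sections, key, body):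
--         parts = [t for t in (ln.strip() for ln in body) if t]
--         if parts:
--             sections[key] = '\n'.join(parts)
--
--     sections = {}
--     key = "full_content"
--     lines = content.split('\n')
--     while True:
--         h = next((i for i, ln in enumerate(lines) if is_header(ln)), None)
--         if h is None:
--             emit(sections, key, lines)
--             break
--         emit(sections, key, lines[:h])
--         key = lines[h].strip().lower().replace(':', '').strip().replace(' ', '_')
--         lines = lines[h + 1:]
--     sections["full_content"] = content
--     return sections
-- ===== Notes on version B (the rewrite author's own statement) =====
-- stated objective: alternative
-- what changed: Replaces A's single running-accumulator pass (current section/current text flushed at each header) by a split-at-next-header loop: repeatedly find the next header line, emit the stripped non-empty lines of the finished segment in one go, and continue on the remainder.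
import Mathlib
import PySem

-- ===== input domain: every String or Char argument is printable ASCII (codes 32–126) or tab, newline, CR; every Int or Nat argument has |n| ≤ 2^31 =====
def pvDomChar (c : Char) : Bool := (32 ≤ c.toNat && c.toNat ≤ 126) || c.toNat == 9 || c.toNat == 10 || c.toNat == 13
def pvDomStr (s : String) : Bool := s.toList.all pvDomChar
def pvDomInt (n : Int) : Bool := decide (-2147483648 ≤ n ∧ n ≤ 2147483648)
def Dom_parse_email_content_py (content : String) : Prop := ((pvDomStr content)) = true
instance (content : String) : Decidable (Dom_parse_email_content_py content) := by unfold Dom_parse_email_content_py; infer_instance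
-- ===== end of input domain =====

-- B replaces A's running-accumulator single pass by a find-next-header/split loop per segment (same cost, different decomposition).

-- ===== PORT A =====
def pvIndicatorsA : List String := ["subject line:", "preview text:", "email content:", "call to action:"]

def pvStepA (st : PySem.Dict String String × String × List String) (line : String) :
    PySem.Dict String String × String × List String :=
  let line_clean := PySem.Str.strip line
  if line_clean = "" then st
  else
    let line_lower := PySem.Str.lower line_clean
    let is_section := pvIndicatorsA.any (fun ind => PySem.Str.isIn ind line_lower)
    if is_section then
      let sections := if st.2.2 ≠ [] then st.1.insert st.2.1 (PySem.Str.join "\n" st.2.2) else st.1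
      (sections, PySem.Str.replace (PySem.Str.strip (PySem.Str.replace line_lower ":" "")) " " "_", [])
    else
      (st.1, st.2.1, st.2.2 ++ [line_clean])

def parse_email_content_py (content : String) : List (String × String) :=
  let lines := (PySem.Str.split? content "\n").getD []
  let st := lines.foldl pvStepA (PySem.Dict.empty, "full_content", [])
  let sections := if st.2.2 ≠ [] then st.1.insert st.2.1 (PySem.Str.join "\n" st.2.2) else st.1
  (sections.insert "full_content" content).items

-- ===== PORT B =====
def pvIndicatorsB : List String := ["subject line:", "preview text:", "email content:", "call to action:"]

def pvIsHeader (ln : String) : Bool :=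
  let low := PySem.Str.lower (PySem.Str.strip ln)
  pvIndicatorsB.any (fun ind => PySem.Str.isIn ind low)

def pvKeyOf (ln : String) : String :=
  PySem.Str.replace (PySem.Str.strip (PySem.Str.replace (PySem.Str.lower (PySem.Str.strip ln)) ":" "")) " " "_"

def pvEmit (sections : PySem.Dict String String) (key : String) (body : List String) :
    PySem.Dict String String :=
  let parts := (body.map PySem.Str.strip).filter (fun t => t ≠ "")
  if parts ≠ [] then sections.insert key (PySem.Str.join "\n" parts) else sections

def pvParseLoop (sections : PySem.Dict String String) (key : String) (lines : List String) :
    PySem.Dict String String :=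
  match h : lines.findIdx? pvIsHeader with
  | none => pvEmit sections key lines
  | some i =>
      pvParseLoop (pvEmit sections key (lines.take i)) (pvKeyOf (lines.getD i ""))
        (lines.drop (i + 1))
termination_by lines.length
decreasing_by
  cases lines with
  | nil => simp at h
  | cons a l => simp only [List.length_drop, List.length_cons]; omega

def parse_email_content_py_alt (content : String) : List (String × String) :=
  let lines := (PySem.Str.split? content "\n").getD []
  let sections := pvParseLoop PySem.Dict.empty "full_content" lines
  (sections.insert "full_content" content).items

-- ===== PRECONDITION & SPEC =====
def Spec_parse_email_content_py (content : String) (out : List (String × String)) : Prop := out = parse_email_content_py_alt content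
instance (content : String) (out : List (String × String)) : Decidable (Spec_parse_email_content_py content out) := by unfold Spec_parse_email_content_py; infer_instance

-- ===== CLAIM (what is proved, stated in full; the proofs are below) =====
def Claim_equal_parse_email_content_py : Prop := ∀ (content : String), Dom_parse_email_content_py content → Spec_parse_email_content_py content (parse_email_content_py content)

-- ===== LEMMAS AND PROOFS =====

def pvFlush (d : PySem.Dict String String) (k : String) (acc : List String) :
    PySem.Dict String String :=
  if acc ≠ [] then d.insert k (PySem.Str.join "\n" acc) else d

def pvFilt (ls : List String) : List String :=
  (ls.map PySem.Str.strip).filter (fun t => t ≠ "")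

-- common abstraction of both loops
def pvH (d : PySem.Dict String String) (k : String) (acc : List String) :
    List String → PySem.Dict String String
  | [] => pvFlush d k acc
  | l :: ls =>
      if pvIsHeader l then pvH (pvFlush d k acc) (pvKeyOf l) [] ls
      else if PySem.Str.strip l = "" then pvH d k acc ls
      else pvH d k (acc ++ [PySem.Str.strip l]) ls

lemma pvIsHeader_of_strip_empty {l : String} (h : PySem.Str.strip l = "") :
    pvIsHeader l = false := by
  simp only [pvIsHeader, h]
  decide

lemma lemmaA (lines : List String) :
    ∀ d k acc,
      (let st := lines.foldl pvStepA (d, k, acc)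
       if st.2.2 ≠ [] then st.1.insert st.2.1 (PySem.Str.join "\n" st.2.2) else st.1)
      = pvH d k acc lines := by
  induction lines with
  | nil => intro d k acc; simp [List.foldl, pvH, pvFlush]
  | cons l ls ih =>
      intro d k acc
      by_cases hemp : PySem.Str.strip l = ""
      · have hh := pvIsHeader_of_strip_empty hemp
        simp only [List.foldl_cons, pvStepA, hemp, if_true, pvH, hh, Bool.false_eq_true,
          if_false]
        exact ih d k acc
      · by_cases hdr : pvIsHeader l
        · have : pvIndicatorsA.any (fun ind => PySem.Str.isIn ind (PySem.Str.lower (PySem.Str.strip l))) = true := hdr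
          simp only [List.foldl_cons, pvStepA, hemp, this, pvH, hdr, if_true]
          exact ih _ _ _
        · have : pvIndicatorsA.any (fun ind => PySem.Str.isIn ind (PySem.Str.lower (PySem.Str.strip l))) = false := by
            simpa [pvIsHeader] using hdr
          simp only [List.foldl_cons, pvStepA, if_neg hemp, this, Bool.false_eq_true, if_false,
            pvH, hdr]
          exact ih _ _ _

def pvParseLoopAcc (d : PySem.Dict String String) (k : String) (acc : List String)
    (lines : List String) : PySem.Dict String String :=
  match lines.findIdx? pvIsHeader with
  | none => pvFlush d k (acc ++ pvFilt lines)
  | some i =>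
      pvParseLoop (pvFlush d k (acc ++ pvFilt (lines.take i))) (pvKeyOf (lines.getD i ""))
        (lines.drop (i + 1))

lemma pvParseLoop_eq_acc (d : PySem.Dict String String) (k : String) (ls : List String) :
    pvParseLoop d k ls = pvParseLoopAcc d k [] ls := by
  rw [pvParseLoop, pvParseLoopAcc]
  cases h : ls.findIdx? pvIsHeader <;> simp [pvEmit, pvFlush, pvFilt]

lemma lemmaB (lines : List String) :
    ∀ d k acc, pvH d k acc lines = pvParseLoopAcc d k acc lines := by
  induction lines with
  | nil => intro d k acc; simp [pvH, pvParseLoopAcc, pvFilt]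
  | cons l ls ih =>
      intro d k acc
      by_cases hdr : pvIsHeader l
      · simp only [pvH, hdr, if_true]
        rw [ih, ← pvParseLoop_eq_acc]
        unfold pvParseLoopAcc
        simp [List.findIdx?_cons, hdr, pvFilt]
      · have hcons : List.findIdx? pvIsHeader (l :: ls) = (List.findIdx? pvIsHeader ls).map (· + 1) := by
          simp [List.findIdx?_cons, hdr]
        by_cases hemp : PySem.Str.strip l = ""
        · simp only [pvH, hdr, Bool.false_eq_true, if_false, hemp, if_true]
          rw [ih]
          unfold pvParseLoopAcc
          rw [hcons]
          cases h : List.findIdx? pvIsHeader ls <;> simp [pvFilt, hemp]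
        · simp only [pvH, hdr, Bool.false_eq_true, if_false, if_neg hemp]
          rw [ih]
          unfold pvParseLoopAcc
          rw [hcons]
          cases h : List.findIdx? pvIsHeader ls <;> simp [pvFilt, hemp]

-- ===== VERDICT (by name: the statement is the Claim_ definition above) =====
theorem parse_email_content_py_spec : Claim_equal_parse_email_content_py := by
  intro content _
  unfold Spec_parse_email_content_py parse_email_content_py parse_email_content_py_alt
  dsimp only
  have h := lemmaA ((PySem.Str.split? content "\n").getD []) PySem.Dict.empty "full_content" []
  dsimp only at h
  rw [h, lemmaB, ← pvParseLoop_eq_acc]
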